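-- pv_equiv track=rewrite | github.com/acsc-org/acsc-challenges-2021-public | rev/Pickle_Rick/challenge/answer_source.py | mix
-- ===== SOURCE A (Python) =====
-- def mix(a):
--     ln = a.__len__()
--     arr = []
--     i = 0
--     while i < ln:
--         s, j = 0, 0
--         while j < ln:
--             s += (j + 1) * a[(i + j) % ln]
--             j += 1
--         s %= 257
--         assert s < 256
--         arr.append(s)
--         i += 1
--     return arr
-- ===== SOURCE B (Python) =====
-- def mix(a):
--     # O(n) sliding recurrence instead of A's O(n^2) double loop:
--     # s_{i+1} = s_i + n*a[i] - sum(a); s_0 computed once.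
--     n = len(a)
--     total = sum(a)
--     s = sum((j + 1) * v for j, v in enumerate(a))
--     out = []
--     for x in a:
--         out.append(s % 257)
--         s += n * x - total
--     return out
-- ===== Notes on version B (the rewrite author's own statement) =====
-- stated objective: faster
-- what changed: Replaces the nested O(n^2) rotation-sum loops by a single O(n) pass using the sliding recurrence s_{i+1} = s_i + n*a[i] - sum(a) with s_0 computed once.
import Mathlib
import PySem

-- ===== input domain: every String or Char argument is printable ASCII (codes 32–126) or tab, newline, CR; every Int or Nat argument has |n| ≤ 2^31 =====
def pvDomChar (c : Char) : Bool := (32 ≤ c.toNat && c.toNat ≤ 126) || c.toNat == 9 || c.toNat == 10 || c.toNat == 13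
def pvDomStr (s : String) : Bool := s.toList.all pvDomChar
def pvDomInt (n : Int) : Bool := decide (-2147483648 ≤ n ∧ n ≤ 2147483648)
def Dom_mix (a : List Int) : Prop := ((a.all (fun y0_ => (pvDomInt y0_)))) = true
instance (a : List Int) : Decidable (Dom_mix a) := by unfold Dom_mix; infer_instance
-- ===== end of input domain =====

-- B replaces A's nested O(n^2) loops by one O(n) pass via the sliding recurrence
-- s_{i+1} = s_i + n*a[i] - sum(a); equivalence of return values proved on Pre_ (A's assert never fires there).

-- ===== PORT A =====
-- inner 'while j < ln' loop: s += (j+1) * a[(i+j) % ln]  (index is in range whenever ln > 0,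
-- which holds on every iteration of the outer loop, so getD's default 0 is never used)
def aSum (a : List Int) (ln i : Int) : Nat → Int
  | 0 => 0
  | j + 1 => aSum a ln i j + ((j : Int) + 1) * PySem.List.pyGetD a (PySem.Int.mod (i + (j : Int)) ln) 0

-- outer 'while i < ln' loop, appending s % 257 (the assert is excluded by Pre_mix)
def aOuter (a : List Int) (ln : Int) : Nat → List Int
  | 0 => []
  | i + 1 => aOuter a ln i ++ [PySem.Int.mod (aSum a ln (i : Int) ln.toNat) 257]

def mix (a : List Int) : List Int := aOuter a (a.length : Int) a.length

-- ===== PORT B =====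
-- s = sum((j + 1) * v for j, v in enumerate(a))
def bInit (a : List Int) : Int := ((PySem.List.enumerate a 0).map (fun p => (p.1 + 1) * p.2)).sum

-- for x in a: out.append(s % 257); s += n * x - total
def bLoop (n total : Int) : List Int → Int → List Int
  | [], _ => []
  | x :: xs, s => PySem.Int.mod s 257 :: bLoop n total xs (s + n * x - total)

def mix_alt (a : List Int) : List Int := bLoop (a.length : Int) a.sum a (bInit a)

-- ===== PRECONDITION & SPEC =====
-- Pre_ excludes exactly the inputs where A's 'assert s < 256' raises AssertionError:
-- some weighted cyclic sum is ≡ 256 (mod 257).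
def Pre_mix (a : List Int) : Prop :=
  ∀ i < a.length,
    (∑ j ∈ Finset.range a.length, ((j : Int) + 1) * a.getD ((i + j) % a.length) 0) % 257 ≠ 256

instance (a : List Int) : Decidable (Pre_mix a) := by unfold Pre_mix; infer_instance

def pvWitness_mix : List Int := [1, 2, 3]

def Spec_mix (a : List Int) (out : List Int) : Prop := out = mix_alt a
instance (a : List Int) (out : List Int) : Decidable (Spec_mix a out) := by unfold Spec_mix; infer_instance

-- ===== CLAIM (what is proved, stated in full; the proofs are below) =====
def Claim_equal_mix : Prop := ∀ (a : List Int), Dom_mix a → Pre_mix a → Spec_mix a (mix a)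

-- ===== LEMMAS AND PROOFS =====

-- spec-level weighted sum: wsum l = sum over j of (j+1) * l[j]
def wsumGo : List Int → Int → Int
  | [], _ => 0
  | x :: xs, k => k * x + wsumGo xs (k + 1)

def wsum (l : List Int) : Int := wsumGo l 1


theorem wsumGo_append_singleton (xs : List Int) (x k : Int) :
    wsumGo (xs ++ [x]) k = wsumGo xs k + (k + xs.length) * x := by
  induction xs generalizing k with
  | nil => simp [wsumGo]
  | cons y ys ih => simp [wsumGo, ih]; ring

theorem wsumGo_shift (xs : List Int) (k : Int) :
    wsumGo xs (k + 1) = wsumGo xs k + xs.sum := by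
  induction xs generalizing k with
  | nil => simp [wsumGo]
  | cons y ys ih => simp [wsumGo, ih]; ring

-- the sliding step on one rotation: rotating x to the back
theorem wsum_rot1 (x : Int) (xs : List Int) :
    wsum (xs ++ [x]) = wsum (x :: xs) + ((x :: xs).length : Int) * x - (x :: xs).sum := by
  have h2 : wsumGo xs 2 = wsumGo xs 1 + xs.sum := wsumGo_shift xs 1
  simp [wsum, wsumGo_append_singleton, wsumGo, h2]
  ring

theorem wsum_rotate_succ (a : List Int) (i : Nat) (hi : i < a.length) :
    wsum (a.rotate (i + 1)) = wsum (a.rotate i) + (a.length : Int) * a[i] - a.sum := by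
  have hlen : (a.rotate i).length = a.length := a.length_rotate i
  have hne : a.rotate i ≠ [] := by
    intro h; rw [h] at hlen; simp at hlen; omega
  obtain ⟨x, xs, hxxs⟩ := List.exists_cons_of_ne_nil hne
  have hx : x = a[i] := by
    have h0 := List.getElem_rotate a i 0 (by rw [hlen]; omega)
    simp only [hxxs, List.getElem_cons_zero, Nat.zero_add, Nat.mod_eq_of_lt hi] at h0
    exact h0
  have hperm : List.Perm (a.rotate i) a := a.rotate_perm i
  have hsum : (x :: xs).sum = a.sum := by rw [← hxxs]; exact hperm.sum_eq
  have hlen' : ((x :: xs).length : Int) = (a.length : Int) := by rw [← hxxs, hlen]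
  have hrot : a.rotate (i + 1) = xs ++ [x] := by
    have : a.rotate (i + 1) = (a.rotate i).rotate 1 := by rw [List.rotate_rotate]
    rw [this, hxxs]
    simp [List.rotate_cons_succ]
  rw [hrot, wsum_rot1, hxxs, ← hx, hsum, hlen']

-- A's inner loop computes the prefix weighted sum of the i-th rotation
theorem aSum_eq (a : List Int) (i : Nat) (j : Nat) (hj : j ≤ a.length) :
    aSum a (a.length : Int) (i : Int) j = wsumGo ((a.rotate i).take j) 1 := by
  induction j with
  | zero => simp [aSum, wsumGo]
  | succ j ih =>
    have hjlt : j < a.length := by omega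
    have hn : 0 < a.length := by omega
    have hidx : PySem.Int.mod ((i : Int) + (j : Int)) (a.length : Int) = (((j + i) % a.length : Nat) : Int) := by
      rw [show ((i : Int) + (j : Int)) = (((j + i : Nat) : Int)) by push_cast; ring]
      exact PySem.Int.mod_natCast _ _
    have hget : PySem.List.pyGetD a (PySem.Int.mod ((i : Int) + (j : Int)) (a.length : Int)) 0
        = (a.rotate i)[j]'(by simpa [a.length_rotate] using hjlt) := by
      rw [hidx, PySem.List.pyGetD_natCast]
      rw [List.getD_eq_getElem a 0 (Nat.mod_lt _ hn)]
      rw [List.getElem_rotate a i j (by simpa [a.length_rotate] using hjlt)]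
    have htake : (a.rotate i).take (j + 1) = (a.rotate i).take j ++ [(a.rotate i)[j]'(by simpa [a.length_rotate] using hjlt)] := by
      exact List.take_succ_eq_append_getElem (by simpa [a.length_rotate] using hjlt)
    rw [aSum, ih (by omega), htake, wsumGo_append_singleton]
    rw [hget]
    have hlt : (((a.rotate i).take j).length : Int) = (j : Int) := by
      simp [List.length_take, a.length_rotate]; omega
    rw [hlt]; ring

theorem aSum_full (a : List Int) (i : Nat) :
    aSum a (a.length : Int) (i : Int) a.length = wsum (a.rotate i) := by
  rw [aSum_eq a i a.length le_rfl, List.take_of_length_le (by simp [a.length_rotate])]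
  rfl

theorem aOuter_eq (a : List Int) (m : Nat) (hm : m ≤ a.length) :
    aOuter a (a.length : Int) m = (List.range m).map (fun i => PySem.Int.mod (wsum (a.rotate i)) 257) := by
  induction m with
  | zero => simp [aOuter]
  | succ m ih =>
    rw [aOuter, ih (by omega), List.range_succ, List.map_append]
    congr 1
    simp only [List.map_cons, List.map_nil]
    rw [show ((a.length : Int)).toNat = a.length from by simp, aSum_full]

theorem mix_eq_map (a : List Int) :
    mix a = (List.range a.length).map (fun i => PySem.Int.mod (wsum (a.rotate i)) 257) := by
  unfold mix
  rw [show ((a.length : Int)) = ((a.length : Nat) : Int) by rfl]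
  exact aOuter_eq a a.length le_rfl

-- B's initial sum is wsum
theorem bInit_go (l : List Int) (k : Int) :
    ((PySem.List.enumerate l k).map (fun p => (p.1 + 1) * p.2)).sum = wsumGo l (k + 1) := by
  induction l generalizing k with
  | nil => simp [PySem.List.enumerate_nil, wsumGo]
  | cons x xs ih =>
    rw [PySem.List.enumerate_cons]
    simp only [List.map_cons, List.sum_cons, wsumGo, ih]

theorem bInit_eq (a : List Int) : bInit a = wsum a := by
  have := bInit_go a 0
  simpa [bInit, wsum] using this

-- B's main loop, generalized over the position i in the traversal of a
theorem bLoop_eq (a : List Int) (m : Nat) : ∀ i, a.length - i = m →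
    bLoop (a.length : Int) a.sum (a.drop i) (wsum (a.rotate i))
      = (List.range' i m).map (fun k => PySem.Int.mod (wsum (a.rotate k)) 257) := by
  induction m with
  | zero =>
    intro i hi
    rw [List.drop_eq_nil_of_le (by omega)]
    simp [bLoop]
  | succ m ih =>
    intro i hi
    have hlt : i < a.length := by omega
    have hdrop : a.drop i = a[i] :: a.drop (i + 1) := List.drop_eq_getElem_cons hlt
    rw [hdrop, bLoop, List.range'_succ, List.map_cons]
    congr 1
    have hstep : wsum (a.rotate i) + (a.length : Int) * a[i] - a.sum = wsum (a.rotate (i + 1)) :=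
      (wsum_rotate_succ a i hlt).symm
    rw [hstep]
    exact ih (i + 1) (by omega)

theorem mix_alt_eq_map (a : List Int) :
    mix_alt a = (List.range a.length).map (fun i => PySem.Int.mod (wsum (a.rotate i)) 257) := by
  unfold mix_alt
  rw [bInit_eq]
  have := bLoop_eq a a.length 0 (by omega)
  simpa [List.range_eq_range'] using this

-- ===== VERDICT (by name: the statement is the Claim_ definition above) =====
theorem mix_spec : Claim_equal_mix := by
  intro a _ _
  unfold Spec_mix
  rw [mix_eq_map, mix_alt_eq_map]
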